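-- pv_equiv track=rewrite | github.com/wi1lku/CS4NLP-Cross-Lingual-Task-Adaptation | nli/utils.py | refine_predictions
-- ===== SOURCE A (Python) =====
-- from typing import List, Tuple, Dict
--
-- def refine_predictions(predictions: List[str]) -> List[str]:
--     """
--     Refine predictions to match the expected labels.
--     Args:
--         predictions (List[str]): List of predicted labels.
--     Returns:
--         List[str]: Refined list of predicted labels.
--     """
--     labels = ["contradiction", "entailment", "neutral"]
--     refined_predictions = []
--     for prediction in predictions:
--         added = False
--         for label in labels:
--             if prediction.startswith(label):
--                 refined_predictions.append(label)
--                 added = True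
--                 break
--         if not added:
--             refined_predictions.append("undefined")
--     return refined_predictions
-- ===== SOURCE B (Python) =====
-- _BY_FIRST = {"c": "contradiction", "e": "entailment", "n": "neutral"}
--
-- def refine_predictions(predictions):
--     """Dispatch on the first character: each label starts with a distinct
--     letter, so one dict lookup replaces the scan over all labels."""
--     refined = []
--     for prediction in predictions:
--         label = _BY_FIRST.get(prediction[:1])
--         refined.append(label if label is not None and prediction.startswith(label) else "undefined")
--     return refined
-- ===== Notes on version B (the rewrite author's own statement) =====
-- stated objective: alternative
-- what changed: The inner scan over all three labels is replaced by a single dict lookup keyed on the prediction's first character (the labels start with distinct letters), followed by one startswith check.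
import Mathlib
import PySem

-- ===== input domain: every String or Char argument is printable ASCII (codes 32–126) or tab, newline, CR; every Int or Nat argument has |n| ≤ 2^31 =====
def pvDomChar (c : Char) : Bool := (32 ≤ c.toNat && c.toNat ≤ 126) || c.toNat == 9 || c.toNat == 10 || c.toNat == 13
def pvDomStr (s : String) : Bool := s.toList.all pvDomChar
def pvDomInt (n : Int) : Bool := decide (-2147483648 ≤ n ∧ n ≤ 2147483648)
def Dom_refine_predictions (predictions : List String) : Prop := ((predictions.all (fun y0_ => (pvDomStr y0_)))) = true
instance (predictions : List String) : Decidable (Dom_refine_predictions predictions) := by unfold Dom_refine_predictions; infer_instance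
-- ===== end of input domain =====

-- B replaces A's inner scan over all labels by one lookup keyed on the prediction's first character (alternative decomposition; same asymptotics).


-- ===== PORT A =====
-- inner 'for label in labels: if prediction.startswith(label): … break' with the 'added' flag,
-- rendered as the first matching label (none = flag stayed False)
def pickLabel (prediction : String) : List String → Option String
  | [] => none
  | label :: rest =>
      if PySem.Str.startswith prediction label then some label else pickLabel prediction rest

def refine_predictions (predictions : List String) : List String :=
  predictions.foldl (fun refined prediction =>
    match pickLabel prediction ["contradiction", "entailment", "neutral"] with
    | some label => refined ++ [label]
    | none => refined ++ ["undefined"]) []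

-- ===== PORT B =====
def pvByFirst : PySem.Dict String String :=
  PySem.Dict.ofList [("c", "contradiction"), ("e", "entailment"), ("n", "neutral")]

-- prediction[:1] is the first character as a string (empty if prediction is empty)
def refineOneB (prediction : String) : String :=
  match PySem.Dict.get? pvByFirst (String.ofList (prediction.toList.take 1)) with
  | some label => if PySem.Str.startswith prediction label then label else "undefined"
  | none => "undefined"

def refine_predictions_alt (predictions : List String) : List String :=
  predictions.map refineOneB

-- ===== PRECONDITION & SPEC =====
def Spec_refine_predictions (predictions : List String) (out : List String) : Prop := out = refine_predictions_alt predictions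
instance (predictions : List String) (out : List String) : Decidable (Spec_refine_predictions predictions out) := by unfold Spec_refine_predictions; infer_instance

-- ===== CLAIM (what is proved, stated in full; the proofs are below) =====
def Claim_equal_refine_predictions : Prop := ∀ (predictions : List String), Dom_refine_predictions predictions → Spec_refine_predictions predictions (refine_predictions predictions)

-- ===== LEMMAS AND PROOFS =====

-- a non-empty pattern whose head differs from the string's head is never a prefix
theorem chars_sw_false (c d : Char) (r t : List Char) (h : c ≠ d) :
    PySem.Chars.startswith (c :: r) (d :: t) = false := by
  cases hb : PySem.Chars.startswith (c :: r) (d :: t) with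
  | false => rfl
  | true =>
    have := (PySem.Chars.startswith_iff _ _).mp hb
    rcases this with ⟨u, hu⟩
    simp at hu
    exact absurd hu.1.symm h

-- a one-letter literal key differs from String.ofList [c] when the letters differ
theorem beq_lit_single (lbl : String) (d c : Char) (h : lbl.toList = [d]) (hne : d ≠ c) :
    (lbl == String.ofList [c]) = false := by
  cases hb : (lbl == String.ofList [c]) with
  | false => rfl
  | true =>
    have he : lbl = String.ofList [c] := eq_of_beq hb
    rw [he] at h
    simp at h
    exact absurd h.symm hne

theorem pvByFirst_items :
    pvByFirst.items = [("c", "contradiction"), ("e", "entailment"), ("n", "neutral")] := by rfl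

-- per-element agreement: A's first-matching-label scan equals B's first-char dispatch
theorem elem_eq (p : String) :
    (match pickLabel p ["contradiction", "entailment", "neutral"] with
      | some label => label
      | none => "undefined") = refineOneB p := by
  rcases hl : p.toList with _ | ⟨c, rest⟩
  · simp [pickLabel, refineOneB, hl, PySem.Dict.get?, pvByFirst_items, PySem.Chars.startswith]
  · by_cases hc : c = 'c'
    · subst hc
      have h2 := chars_sw_false 'c' 'e' rest ['n','t','a','i','l','m','e','n','t'] (by decide)
      have h3 := chars_sw_false 'c' 'n' rest ['e','u','t','r','a','l'] (by decide)
      by_cases hb : PySem.Chars.startswith ('c' :: rest)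
          ['c','o','n','t','r','a','d','i','c','t','i','o','n'] = true <;>
        simp [pickLabel, refineOneB, hl, h2, h3, PySem.Dict.get?, pvByFirst_items, hb]
    · by_cases he : c = 'e'
      · subst he
        have h1 := chars_sw_false 'e' 'c' rest ['o','n','t','r','a','d','i','c','t','i','o','n'] (by decide)
        have h3 := chars_sw_false 'e' 'n' rest ['e','u','t','r','a','l'] (by decide)
        by_cases hb : PySem.Chars.startswith ('e' :: rest)
            ['e','n','t','a','i','l','m','e','n','t'] = true <;>
          simp [pickLabel, refineOneB, hl, h1, h3, PySem.Dict.get?, pvByFirst_items, hb]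
      · by_cases hn : c = 'n'
        · subst hn
          have h1 := chars_sw_false 'n' 'c' rest ['o','n','t','r','a','d','i','c','t','i','o','n'] (by decide)
          have h2 := chars_sw_false 'n' 'e' rest ['n','t','a','i','l','m','e','n','t'] (by decide)
          by_cases hb : PySem.Chars.startswith ('n' :: rest)
              ['n','e','u','t','r','a','l'] = true <;>
            simp [pickLabel, refineOneB, hl, h1, h2, PySem.Dict.get?, pvByFirst_items, hb]
        · have h1 := chars_sw_false c 'c' rest ['o','n','t','r','a','d','i','c','t','i','o','n'] hc
          have h2 := chars_sw_false c 'e' rest ['n','t','a','i','l','m','e','n','t'] he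
          have h3 := chars_sw_false c 'n' rest ['e','u','t','r','a','l'] hn
          have k1 := beq_lit_single "c" 'c' c rfl (fun h => hc h.symm)
          have k2 := beq_lit_single "e" 'e' c rfl (fun h => he h.symm)
          have k3 := beq_lit_single "n" 'n' c rfl (fun h => hn h.symm)
          simp [pickLabel, refineOneB, hl, h1, h2, h3, PySem.Dict.get?, pvByFirst_items,
            k1, k2, k3]

-- the foldl with append accumulator is the map of the per-element result
theorem foldA_eq_map (predictions : List String) (acc : List String) :
    predictions.foldl (fun refined prediction =>
      match pickLabel prediction ["contradiction", "entailment", "neutral"] with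
      | some label => refined ++ [label]
      | none => refined ++ ["undefined"]) acc
    = acc ++ predictions.map (fun p =>
        match pickLabel p ["contradiction", "entailment", "neutral"] with
        | some label => label
        | none => "undefined") := by
  induction predictions generalizing acc with
  | nil => simp
  | cons p ps ih =>
    simp only [List.foldl, List.map]
    rw [ih]
    cases pickLabel p ["contradiction", "entailment", "neutral"] <;> simp

-- ===== VERDICT (by name: the statement is the Claim_ definition above) =====
theorem refine_predictions_spec : Claim_equal_refine_predictions := by
  intro predictions _
  unfold Spec_refine_predictions refine_predictions refine_predictions_alt
  rw [foldA_eq_map]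
  simp only [List.nil_append]
  exact List.map_congr_left (fun p _ => elem_eq p)
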